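-- pv_equiv track=rewrite | github.com/hwanggu-corgi/algorithm-practice | Progammers/전화번호 목록/main.py | solution
-- ===== SOURCE A (Python) =====
-- def solution(phone_book):
--     N = len(phone_book)
--     i = 0
--     while i < N:
--         j = i +1
--         while j < N:
--             if len(phone_book[i]) < len(phone_book[j]) and (phone_book[i] in phone_book[j]):
--                 return False
--
--             j += 1
--         i += 1
--
--     answer = True
--     return answer
-- ===== SOURCE B (Python) =====
-- def solution(phone_book):
--     # One pass with a hash set of already-seen numbers: a pair (earlier, later)
--     # with earlier a strictly shorter substring of later exists iff, when we
--     # reach the later string, one of its strictly shorter substrings is in the set.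
--     seen = set()
--     for b in phone_book:
--         n = len(b)
--         if any(b[i:i + l] in seen for l in range(n) for i in range(n - l + 1)):
--             return False
--         seen.add(b)
--     return True
-- ===== Notes on version B (the rewrite author's own statement) =====
-- stated objective: faster
-- what changed: A compares every ordered pair of entries with Python's substring operator (O(N^2) pairs); B makes a single pass keeping a hash set of the strings seen so far and, for each new string, checks whether any of its strictly shorter substrings is already in the set, removing the quadratic scan over the list.
import Mathlib
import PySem

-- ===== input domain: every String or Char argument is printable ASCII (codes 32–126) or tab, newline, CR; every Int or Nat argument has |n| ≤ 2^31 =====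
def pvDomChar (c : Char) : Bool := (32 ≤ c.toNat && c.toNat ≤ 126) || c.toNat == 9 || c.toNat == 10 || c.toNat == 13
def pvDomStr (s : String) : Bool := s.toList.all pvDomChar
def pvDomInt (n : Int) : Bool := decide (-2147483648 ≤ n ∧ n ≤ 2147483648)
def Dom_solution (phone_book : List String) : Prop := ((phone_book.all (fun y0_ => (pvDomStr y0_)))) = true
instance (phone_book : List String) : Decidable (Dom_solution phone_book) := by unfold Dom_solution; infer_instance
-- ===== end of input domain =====

-- B replaces A's pairwise substring scan (quadratic in the number of strings) by one pass that
-- checks each string's strictly shorter substrings against a hash set of the strings seen so far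
-- (objective: faster; measurably so on the generated inputs).

-- ===== PORT A =====
-- inner 'while j < N' loop of A
def solLoopJ (phone_book : List String) (N i j : Int) : Bool :=
  if h : j < N then
    if PySem.Str.len (PySem.List.pyGetD phone_book i "") < PySem.Str.len (PySem.List.pyGetD phone_book j "") ∧
       PySem.Str.isIn (PySem.List.pyGetD phone_book i "") (PySem.List.pyGetD phone_book j "") = true then
      false
    else
      solLoopJ phone_book N i (j + 1)
  else
    true
termination_by (N - j).toNat
decreasing_by omega

-- outer 'while i < N' loop of A ('return False' inside the inner loop propagates out)
def solLoopI (phone_book : List String) (N i : Int) : Bool :=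
  if h : i < N then
    if solLoopJ phone_book N i (i + 1) = false then
      false
    else
      solLoopI phone_book N (i + 1)
  else
    true
termination_by (N - i).toNat
decreasing_by omega

def solution (phone_book : List String) : Bool :=
  solLoopI phone_book (PySem.List.len phone_book) 0

-- ===== PORT B =====
-- 'any(b[i:i+l] in seen for l in range(n) for i in range(n - l + 1))'
def altCheck (seen : PySem.Set String) (b : String) : Bool :=
  (PySem.List.pyRange 0 (PySem.Str.len b) 1).any (fun l =>
    (PySem.List.pyRange 0 (PySem.Str.len b - l + 1) 1).any (fun i =>
      PySem.Set.contains seen (PySem.Str.slice b (some i) (some (i + l)))))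

-- 'for b in phone_book: … seen.add(b)'
def altGo (seen : PySem.Set String) : List String → Bool
  | [] => true
  | b :: rest => if altCheck seen b then false else altGo (PySem.Set.add seen b) rest

def solution_alt (phone_book : List String) : Bool :=
  altGo PySem.Set.empty phone_book

-- ===== PRECONDITION & SPEC =====
def Spec_solution (phone_book : List String) (out : Bool) : Prop := out = solution_alt phone_book
instance (phone_book : List String) (out : Bool) : Decidable (Spec_solution phone_book out) := by unfold Spec_solution; infer_instance

-- ===== CLAIM (what is proved, stated in full; the proofs are below) =====
def Claim_equal_solution : Prop := ∀ (phone_book : List String), Dom_solution phone_book → Spec_solution phone_book (solution phone_book)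

-- ===== LEMMAS AND PROOFS =====

-- 's is a strictly shorter substring of b'
def pvProper (s b : String) : Prop := s.toList.length < b.toList.length ∧ s.toList <:+: b.toList

lemma pvProper_iff_cond (s b : String) :
    (PySem.Str.len s < PySem.Str.len b ∧ PySem.Str.isIn s b = true) ↔ pvProper s b := by
  simp [pvProper, PySem.Str.len_eq, PySem.Chars.isIn_iff_infix]

-- the toList of b[i:i+l] for 0 ≤ i, 0 ≤ l
lemma toList_slice_eq (b : String) (i l : Int) (hi0 : 0 ≤ i) (hl0 : 0 ≤ l) :
    (PySem.Str.slice b (some i) (some (i + l))).toList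
      = List.take l.toNat (List.drop i.toNat b.toList) := by
  rw [PySem.Str.toList_slice, PySem.Chars.slice_eq_listSlice, PySem.List.slice_toNat _ hi0 (by omega)]
  congr 1
  omega

-- B's inner check finds exactly the seen strings that are strictly shorter substrings of b
lemma altCheck_iff (seen : PySem.Set String) (b : String) :
    altCheck seen b = true ↔ ∃ s ∈ seen, pvProper s b := by
  unfold altCheck
  simp only [List.any_eq_true]
  constructor
  · rintro ⟨l, hl, i, hi, hc⟩
    rw [PySem.List.mem_pyRange_iff_of_pos one_pos] at hl hi
    obtain ⟨hl0, hlb, -⟩ := hl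
    obtain ⟨hi0, hib, -⟩ := hi
    rw [PySem.Str.len_eq] at hlb hib
    refine ⟨_, (PySem.Set.contains_iff _ _).mp hc, ?_, ?_⟩
    · rw [toList_slice_eq b i l hi0 hl0]
      simp only [List.length_take, List.length_drop]
      omega
    · rw [toList_slice_eq b i l hi0 hl0]
      exact (List.take_prefix _ _).isInfix.trans (List.drop_suffix _ _).isInfix
  · rintro ⟨s, hs, hlen, hinf⟩
    obtain ⟨u, v, huv⟩ := hinf
    have hblen : b.toList.length = u.length + s.toList.length + v.length := by
      rw [← huv]; simp; omega
    refine ⟨(s.toList.length : Int), ?_, (u.length : Int), ?_, ?_⟩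
    · rw [PySem.List.mem_pyRange_iff_of_pos one_pos, PySem.Str.len_eq]
      exact ⟨by positivity, by exact_mod_cast hlen, one_dvd _⟩
    · rw [PySem.List.mem_pyRange_iff_of_pos one_pos, PySem.Str.len_eq]
      refine ⟨by positivity, ?_, one_dvd _⟩
      have : u.length ≤ b.toList.length - s.toList.length := by omega
      omega
    · have hsl : PySem.Str.slice b (some (u.length : Int)) (some ((u.length : Int) + (s.toList.length : Int))) = s := by
        apply String.toList_inj.mp
        rw [PySem.Str.toList_slice, PySem.Chars.slice_eq_listSlice, PySem.List.slice_natCast_add]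
        rw [← huv, List.append_assoc, List.drop_left, List.take_left]
      rw [hsl]
      exact (PySem.Set.contains_iff _ _).mpr hs

-- invariant of B's main loop
lemma altGo_iff (rest : List String) (seen : PySem.Set String) :
    altGo seen rest = false ↔
      ∃ pre b suf, rest = pre ++ b :: suf ∧ ∃ s, (s ∈ seen ∨ s ∈ pre) ∧ pvProper s b := by
  induction rest generalizing seen with
  | nil => simp [altGo]
  | cons b rest ih =>
    simp only [altGo]
    by_cases hc : altCheck seen b = true
    · rw [if_pos hc]
      obtain ⟨s, hs, hp⟩ := (altCheck_iff seen b).mp hc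
      exact iff_of_true rfl ⟨[], b, rest, rfl, s, Or.inl hs, hp⟩
    · rw [if_neg hc, ih]
      constructor
      · rintro ⟨pre, b', suf, heq, s, hmem, hp⟩
        refine ⟨b :: pre, b', suf, by rw [heq]; rfl, s, ?_, hp⟩
        rcases hmem with hmem | hmem
        · rcases (PySem.Set.mem_add seen b s).mp hmem with h | h
          · exact Or.inl h
          · exact Or.inr (by simp [h])
        · exact Or.inr (by simp [hmem])
      · rintro ⟨pre, b', suf, heq, s, hmem, hp⟩
        cases pre with
        | nil =>
          simp only [List.nil_append, List.cons.injEq] at heq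
          exfalso
          apply hc
          apply (altCheck_iff seen b).mpr
          refine ⟨s, ?_, by rw [heq.1]; exact hp⟩
          rcases hmem with h | h
          · exact h
          · exact absurd h (List.not_mem_nil)
        | cons p pre' =>
          simp only [List.cons_append, List.cons.injEq] at heq
          refine ⟨pre', b', suf, heq.2, s, ?_, hp⟩
          rcases hmem with h | h
          · exact Or.inl ((PySem.Set.mem_add seen b s).mpr (Or.inl h))
          · rcases List.mem_cons.mp h with h | h
            · exact Or.inl ((PySem.Set.mem_add seen b s).mpr (Or.inr (by rw [h, ← heq.1])))
            · exact Or.inr h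

-- A's inner loop
lemma loopJ_iff (pb : List String) (N i j : Int) (hN : N = (pb.length : Int)) :
    solLoopJ pb N i j = false ↔
      ∃ k : Int, j ≤ k ∧ k < N ∧ pvProper (PySem.List.pyGetD pb i "") (PySem.List.pyGetD pb k "") := by
  fun_induction solLoopJ pb N i j with
  | case1 j h hcond =>
    exact iff_of_true rfl ⟨j, le_refl j, h, (pvProper_iff_cond _ _).mp hcond⟩
  | case2 j h hcond ih =>
    rw [ih]
    constructor
    · rintro ⟨k, hk1, hk2, hk3⟩; exact ⟨k, by omega, hk2, hk3⟩
    · rintro ⟨k, hk1, hk2, hk3⟩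
      refine ⟨k, ?_, hk2, hk3⟩
      rcases eq_or_lt_of_le hk1 with h' | h'
      · exfalso; exact hcond (by rw [h']; exact (pvProper_iff_cond _ _).mpr hk3)
      · omega
  | case3 j h =>
    simp only [Bool.true_eq_false, false_iff]
    rintro ⟨k, hk1, hk2, -⟩
    omega

-- A's outer loop
lemma loopI_iff (pb : List String) (N i : Int) (hN : N = (pb.length : Int)) :
    solLoopI pb N i = false ↔
      ∃ a k : Int, i ≤ a ∧ a < k ∧ k < N ∧
        pvProper (PySem.List.pyGetD pb a "") (PySem.List.pyGetD pb k "") := by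
  fun_induction solLoopI pb N i with
  | case1 i h hJ =>
    obtain ⟨k, hk1, hk2, hk3⟩ := (loopJ_iff pb N i (i + 1) hN).mp hJ
    exact iff_of_true rfl ⟨i, k, le_refl i, by omega, hk2, hk3⟩
  | case2 i h hJ ih =>
    rw [ih]
    constructor
    · rintro ⟨a, k, h1, h2, h3, h4⟩; exact ⟨a, k, by omega, h2, h3, h4⟩
    · rintro ⟨a, k, h1, h2, h3, h4⟩
      rcases eq_or_lt_of_le h1 with h' | h'
      · exfalso
        exact hJ ((loopJ_iff pb N i (i + 1) hN).mpr ⟨k, by omega, h3, by rw [h']; exact h4⟩)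
      · exact ⟨a, k, by omega, h2, h3, h4⟩
  | case3 i h =>
    simp only [Bool.true_eq_false, false_iff]
    rintro ⟨a, k, h1, h2, h3, -⟩
    omega

-- the indexed form and the split form of 'some earlier string is a proper substring of a later one' agree
lemma bridge_iff (pb : List String) :
    (∃ a k : Int, 0 ≤ a ∧ a < k ∧ k < (pb.length : Int) ∧
        pvProper (PySem.List.pyGetD pb a "") (PySem.List.pyGetD pb k "")) ↔
      ∃ pre b suf, pb = pre ++ b :: suf ∧ ∃ s, (s ∈ (PySem.Set.empty : PySem.Set String) ∨ s ∈ pre) ∧ pvProper s b := by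
  constructor
  · rintro ⟨a, k, ha0, hak, hkN, hp⟩
    have hk0 : (0:Int) ≤ k := by omega
    have hkk : k = ((k.toNat : Nat) : Int) := by omega
    have haa : a = ((a.toNat : Nat) : Int) := by omega
    rw [hkk, haa, PySem.List.pyGetD_natCast, PySem.List.pyGetD_natCast] at hp
    have hkl : k.toNat < pb.length := by omega
    have hal : a.toNat < pb.length := by omega
    rw [List.getD_eq_getElem pb "" hkl, List.getD_eq_getElem pb "" hal] at hp
    refine ⟨pb.take k.toNat, pb[k.toNat], pb.drop (k.toNat + 1), ?_, pb[a.toNat], ?_, hp⟩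
    · conv_lhs => rw [← List.take_append_drop k.toNat pb]
      rw [List.drop_eq_getElem_cons hkl]
    · refine Or.inr (List.mem_iff_getElem.mpr ⟨a.toNat, ?_, ?_⟩)
      · simp only [List.length_take]; omega
      · exact List.getElem_take
  · rintro ⟨pre, b, suf, rfl, s, hmem, hp⟩
    replace hmem : s ∈ pre := by
      rcases hmem with h | h
      · exact absurd h (List.not_mem_nil)
      · exact h
    obtain ⟨a', ha', hsa⟩ := List.mem_iff_getElem.mp hmem
    have hlen : (pre ++ b :: suf).length = pre.length + suf.length + 1 := by
      simp; omega
    refine ⟨(a' : Int), (pre.length : Int), by positivity, by exact_mod_cast ha', by rw [hlen]; push_cast; omega, ?_⟩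
    have h1 : PySem.List.pyGetD (pre ++ b :: suf) (a' : Int) "" = s := by
      rw [PySem.List.pyGetD_natCast, List.getD_eq_getElem _ "" (by rw [hlen]; omega)]
      rw [List.getElem_append_left (by omega)]
      exact hsa
    have h2 : PySem.List.pyGetD (pre ++ b :: suf) (pre.length : Int) "" = b := by
      rw [PySem.List.pyGetD_natCast, List.getD_eq_getElem _ "" (by rw [hlen]; omega)]
      rw [List.getElem_append_right (le_refl pre.length)]
      simp
    rw [h1, h2]
    exact hp

-- ===== VERDICT (by name: the statement is the Claim_ definition above) =====
theorem solution_spec : Claim_equal_solution := by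
  intro pb _
  unfold Spec_solution
  have hA : solution pb = false ↔ _ :=
    loopI_iff pb (PySem.List.len pb) 0 (by simp [PySem.List.len_eq])
  have hB : solution_alt pb = false ↔ _ := altGo_iff pb PySem.Set.empty
  have key : solution pb = false ↔ solution_alt pb = false := by
    rw [hA, hB, ← bridge_iff pb]
    constructor
    · rintro ⟨a, k, h1, h2, h3, h4⟩; exact ⟨a, k, le_of_eq rfl |>.trans h1, h2, h3, h4⟩
    · rintro ⟨a, k, h1, h2, h3, h4⟩; exact ⟨a, k, h1, h2, h3, h4⟩
  cases hx : solution pb <;> cases hy : solution_alt pb <;> simp_all
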